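-- pv_equiv track=rewrite | github.com/ZXY39/G3KU-Agent | main/runtime/node_prompt_contract.py | _render_repair_required_tool_section
-- ===== SOURCE A (Python) =====
-- from typing import Any
--
-- def _normalized_repair_required_tool_items(items: list[Any] | None) -> list[dict[str, str]]:
--     ordered: list[dict[str, str]] = []
--     seen: set[str] = set()
--     for item in list(items or []):
--         if not isinstance(item, dict):
--             continue
--         tool_id = str(item.get('tool_id') or '').strip()
--         if not tool_id or tool_id in seen:
--             continue
--         seen.add(tool_id)
--         ordered.append(
--             {
--                 'tool_id': tool_id,
--                 'description': str(item.get('description') or '').strip(),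
--                 'reason': str(item.get('reason') or '').strip(),
--             }
--         )
--     return ordered
--
-- def _render_repair_required_tool_section(items: list[dict[str, str]] | None) -> list[str]:
--     normalized_items = _normalized_repair_required_tool_items(items)
--     if not normalized_items:
--         return []
--     lines = [
--         'repair_required_tools:',
--         '- These tools must be repaired before use.',
--         '- Use `load_tool_context(tool_id="<tool_id>")` first.',
--         '- Use `exec`, `filesystem_write`, `filesystem_edit`, `filesystem_copy`, `filesystem_move`, or `filesystem_propose_patch` to repair them.',
--         '- Reference skill: `repair-tool`.',
--     ]
--     for item in normalized_items:
--         tool_id = str(item.get('tool_id') or '').strip()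
--         description = str(item.get('description') or '').strip()
--         reason = str(item.get('reason') or '').strip()
--         detail = description if description else 'No description available.'
--         if reason:
--             detail = f'{detail} Reason: {reason}'
--         lines.append(f'- `{tool_id}`: {detail}')
--     return lines
-- ===== SOURCE B (Python) =====
-- def _render_repair_required_tool_section(items):
--     # Single pass: skip non-dicts and empty/duplicate tool_ids, build the
--     # detail lines directly; prepend the fixed header only if any were kept.
--     seen = set()
--     details = []
--     for item in list(items or []):
--         if not isinstance(item, dict):
--             continue
--         tool_id = str(item.get('tool_id') or '').strip()
--         if not tool_id or tool_id in seen: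
--             continue
--         seen.add(tool_id)
--         description = str(item.get('description') or '').strip()
--         reason = str(item.get('reason') or '').strip()
--         detail = description if description else 'No description available.'
--         if reason:
--             detail = f'{detail} Reason: {reason}'
--         details.append(f'- `{tool_id}`: {detail}')
--     if not details:
--         return []
--     return [
--         'repair_required_tools:',
--         '- These tools must be repaired before use.',
--         '- Use `load_tool_context(tool_id="<tool_id>")` first.',
--         '- Use `exec`, `filesystem_write`, `filesystem_edit`, `filesystem_copy`, `filesystem_move`, or `filesystem_propose_patch` to repair them.',
--         '- Reference skill: `repair-tool`.',
--     ] + details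
-- ===== Notes on version B (the rewrite author's own statement) =====
-- stated objective: simpler
-- what changed: Fused the two passes into one single-pass builder that emits the formatted detail lines directly, eliminating the intermediate list of normalized dicts and the second stripping pass.
import Mathlib
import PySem

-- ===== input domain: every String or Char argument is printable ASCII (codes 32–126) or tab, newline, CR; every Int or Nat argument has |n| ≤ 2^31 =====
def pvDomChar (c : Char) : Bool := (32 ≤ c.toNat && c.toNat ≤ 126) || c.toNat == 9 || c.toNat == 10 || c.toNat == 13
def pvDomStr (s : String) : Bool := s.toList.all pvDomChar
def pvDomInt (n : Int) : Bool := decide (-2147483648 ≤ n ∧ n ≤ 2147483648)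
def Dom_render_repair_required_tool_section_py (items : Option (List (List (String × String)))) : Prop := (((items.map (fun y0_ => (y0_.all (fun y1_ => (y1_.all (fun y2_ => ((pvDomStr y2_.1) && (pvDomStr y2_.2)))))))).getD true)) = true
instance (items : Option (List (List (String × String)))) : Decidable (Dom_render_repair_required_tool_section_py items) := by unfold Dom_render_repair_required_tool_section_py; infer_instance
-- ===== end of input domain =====

-- B fuses A's two passes into one single-pass builder of the detail lines (objective: simpler).


-- ===== PORT A =====
-- str(item.get(k) or '').strip(): .get returns None when absent, 'or' maps both None and '' to ''
def pyStripGet (d : PySem.Dict String String) (k : String) : String :=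
  PySem.Str.strip ((d.get? k).getD "")

def normalized_repair_required_tool_items_py
    (items : Option (List (List (String × String)))) :
    List (PySem.Dict String String) :=
  (((items.getD []).foldl
      (fun (st : List (PySem.Dict String String) × PySem.Set String) raw =>
        -- isinstance(item, dict) is always true under the Lean typing
        let item : PySem.Dict String String := PySem.Dict.mk raw
        let tool_id := pyStripGet item "tool_id"
        if tool_id = "" ∨ PySem.Set.contains st.2 tool_id then st
        else
          (st.1 ++ [PySem.Dict.mk
              [("tool_id", tool_id),
               ("description", pyStripGet item "description"),
               ("reason", pyStripGet item "reason")]],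
           PySem.Set.add st.2 tool_id))
      ([], PySem.Set.empty))).1

def render_repair_required_tool_section_py (items : Option (List (List (String × String)))) : List String :=
  let normalized_items := normalized_repair_required_tool_items_py items
  if normalized_items = [] then []
  else
    normalized_items.foldl
      (fun lines item =>
        let tool_id := pyStripGet item "tool_id"
        let description := pyStripGet item "description"
        let reason := pyStripGet item "reason"
        let detail := if description = "" then "No description available." else description
        let detail := if reason = "" then detail else detail ++ " Reason: " ++ reason
        lines ++ ["- `" ++ tool_id ++ "`: " ++ detail])
      ["repair_required_tools:",
       "- These tools must be repaired before use.",
       "- Use `load_tool_context(tool_id=\"<tool_id>\")` first.",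
       "- Use `exec`, `filesystem_write`, `filesystem_edit`, `filesystem_copy`, `filesystem_move`, or `filesystem_propose_patch` to repair them.",
       "- Reference skill: `repair-tool`."]

-- ===== PORT B =====
def render_repair_required_tool_section_py_alt (items : Option (List (List (String × String)))) : List String :=
  let details :=
    (((items.getD []).foldl
        (fun (st : List String × PySem.Set String) raw =>
          -- isinstance(item, dict) is always true under the Lean typing
          let item : PySem.Dict String String := PySem.Dict.mk raw
          let tool_id := PySem.Str.strip ((item.get? "tool_id").getD "")
          if tool_id = "" ∨ PySem.Set.contains st.2 tool_id then st
          else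
            let description := PySem.Str.strip ((item.get? "description").getD "")
            let reason := PySem.Str.strip ((item.get? "reason").getD "")
            let detail := if description = "" then "No description available." else description
            let detail := if reason = "" then detail else detail ++ " Reason: " ++ reason
            (st.1 ++ ["- `" ++ tool_id ++ "`: " ++ detail], PySem.Set.add st.2 tool_id))
        ([], PySem.Set.empty))).1
  if details = [] then []
  else
    ["repair_required_tools:",
     "- These tools must be repaired before use.",
     "- Use `load_tool_context(tool_id=\"<tool_id>\")` first.",
     "- Use `exec`, `filesystem_write`, `filesystem_edit`, `filesystem_copy`, `filesystem_move`, or `filesystem_propose_patch` to repair them.",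
     "- Reference skill: `repair-tool`."] ++ details

-- ===== PRECONDITION & SPEC =====
def Spec_render_repair_required_tool_section_py (items : Option (List (List (String × String)))) (out : List String) : Prop := out = render_repair_required_tool_section_py_alt items
instance (items : Option (List (List (String × String)))) (out : List String) : Decidable (Spec_render_repair_required_tool_section_py items out) := by unfold Spec_render_repair_required_tool_section_py; infer_instance

-- ===== CLAIM (what is proved, stated in full; the proofs are below) =====
def Claim_equal_render_repair_required_tool_section_py : Prop := ∀ (items : Option (List (List (String × String)))), Dom_render_repair_required_tool_section_py items → Spec_render_repair_required_tool_section_py items (render_repair_required_tool_section_py items)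

-- ===== LEMMAS AND PROOFS =====

theorem dropWhile_idem {α : Type} (p : α → Bool) (l : List α) :
    List.dropWhile p (List.dropWhile p l) = List.dropWhile p l := by
  induction l with
  | nil => simp
  | cons a l ih =>
    by_cases h : p a
    · simp [h, ih]
    · simp [h]

theorem strip_idem_chars (s : List Char) :
    PySem.Chars.strip (PySem.Chars.strip s) = PySem.Chars.strip s := by
  unfold PySem.Chars.strip PySem.Chars.lstrip PySem.Chars.rstrip
  set p := PySem.Chars.isspace with hp
  set w := List.dropWhile p s with hw
  set t := (List.dropWhile p w.reverse).reverse with ht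
  have hlst : List.dropWhile p t = t := by
    have hpre : t <+: w := by
      rw [ht]
      have : List.dropWhile p w.reverse <:+ w.reverse := List.dropWhile_suffix p
      exact List.reverse_suffix.mp (by simpa using this)
    rcases t with _ | ⟨a, t'⟩
    · simp
    · rcases hpre with ⟨u, hu⟩
      have hwdw : List.dropWhile p w = w := dropWhile_idem p s
      have hna : ¬ p a = true := by
        have hwc : w = a :: (t' ++ u) := by rw [← hu]; simp
        intro hpa
        rw [hwc, List.dropWhile_cons, if_pos hpa] at hwdw
        have hle := List.length_dropWhile_le p (t' ++ u)
        rw [hwdw] at hle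
        simp at hle
      simp [hna]
  rw [hlst, ht, List.reverse_reverse, dropWhile_idem]

theorem strip_idem (s : String) :
    PySem.Str.strip (PySem.Str.strip s) = PySem.Str.strip s := by
  simp [PySem.Str.strip, strip_idem_chars]

-- proof-side recursive forms of the two folds
def stepSkip (seen : PySem.Set String) (raw : List (String × String)) : Option String :=
  let tool_id := PySem.Str.strip (((PySem.Dict.mk raw).get? "tool_id").getD "")
  if tool_id = "" ∨ PySem.Set.contains seen tool_id then none else some tool_id

def normRec : List (List (String × String)) → PySem.Set String → List (PySem.Dict String String)
  | [], _ => []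
  | raw :: rest, seen =>
    let item : PySem.Dict String String := PySem.Dict.mk raw
    let tool_id := pyStripGet item "tool_id"
    if tool_id = "" ∨ PySem.Set.contains seen tool_id then normRec rest seen
    else
      PySem.Dict.mk
          [("tool_id", tool_id),
           ("description", pyStripGet item "description"),
           ("reason", pyStripGet item "reason")] :: normRec rest (PySem.Set.add seen tool_id)

def lineOf (item : PySem.Dict String String) : String :=
  let tool_id := pyStripGet item "tool_id"
  let description := pyStripGet item "description"
  let reason := pyStripGet item "reason"
  let detail := if description = "" then "No description available." else description
  let detail := if reason = "" then detail else detail ++ " Reason: " ++ reason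
  "- `" ++ tool_id ++ "`: " ++ detail

theorem foldA_acc (l : List (List (String × String)))
    (acc : List (PySem.Dict String String)) (seen : PySem.Set String) :
    (l.foldl
      (fun (st : List (PySem.Dict String String) × PySem.Set String) raw =>
        let item : PySem.Dict String String := PySem.Dict.mk raw
        let tool_id := pyStripGet item "tool_id"
        if tool_id = "" ∨ PySem.Set.contains st.2 tool_id then st
        else
          (st.1 ++ [PySem.Dict.mk
              [("tool_id", tool_id),
               ("description", pyStripGet item "description"),
               ("reason", pyStripGet item "reason")]],
           PySem.Set.add st.2 tool_id))
      (acc, seen)).1 = acc ++ normRec l seen := by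
  induction l generalizing acc seen with
  | nil => simp [normRec]
  | cons raw rest ih =>
    simp only [List.foldl_cons, normRec]
    split
    · exact ih acc seen
    · rw [ih]; simp

theorem foldB_acc (l : List (List (String × String)))
    (acc : List String) (seen : PySem.Set String) :
    (l.foldl
      (fun (st : List String × PySem.Set String) raw =>
        let item : PySem.Dict String String := PySem.Dict.mk raw
        let tool_id := PySem.Str.strip ((item.get? "tool_id").getD "")
        if tool_id = "" ∨ PySem.Set.contains st.2 tool_id then st
        else
          let description := PySem.Str.strip ((item.get? "description").getD "")
          let reason := PySem.Str.strip ((item.get? "reason").getD "")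
          let detail := if description = "" then "No description available." else description
          let detail := if reason = "" then detail else detail ++ " Reason: " ++ reason
          (st.1 ++ ["- `" ++ tool_id ++ "`: " ++ detail], PySem.Set.add st.2 tool_id))
      (acc, seen)).1 = acc ++ (normRec l seen).map lineOf := by
  induction l generalizing acc seen with
  | nil => simp [normRec]
  | cons raw rest ih =>
    simp only [List.foldl_cons, normRec, pyStripGet]
    split
    · exact ih acc seen
    · rw [ih]
      simp only [List.map_cons, lineOf]
      simp [pyStripGet, PySem.Dict.get?_mk_cons, strip_idem]

theorem renderFold (l : List (PySem.Dict String String)) (acc : List String) :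
    (l.foldl (fun lines item =>
        let tool_id := pyStripGet item "tool_id"
        let description := pyStripGet item "description"
        let reason := pyStripGet item "reason"
        let detail := if description = "" then "No description available." else description
        let detail := if reason = "" then detail else detail ++ " Reason: " ++ reason
        lines ++ ["- `" ++ tool_id ++ "`: " ++ detail]) acc) = acc ++ l.map lineOf := by
  induction l generalizing acc with
  | nil => simp
  | cons a l ih => rw [List.foldl_cons, ih]; simp [lineOf]

-- ===== VERDICT (by name: the statement is the Claim_ definition above) =====
theorem render_repair_required_tool_section_py_spec : Claim_equal_render_repair_required_tool_section_py := by
  intro items _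
  unfold Spec_render_repair_required_tool_section_py
  unfold render_repair_required_tool_section_py render_repair_required_tool_section_py_alt
  unfold normalized_repair_required_tool_items_py
  rw [foldA_acc, foldB_acc]
  simp only [List.nil_append]
  rw [renderFold]
  rcases h : normRec (items.getD []) PySem.Set.empty with _ | ⟨d, ds⟩ <;> simp
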